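-- pv_equiv track=rewrite | github.com/haolunc/ARC-RL | reference_solutions/solutions/ce9e57f2.py | transform
-- ===== SOURCE A (Python) =====
-- def transform(grid):
--
--     out = [row[:] for row in grid]
--
--     height = len(out)
--     if height == 0:
--         return out
--     width = len(out[0])
--
--     for col in range(width):
--
--         rows_with_2 = [row for row in range(height) if out[row][col] == 2]
--
--         n = len(rows_with_2)
--
--         k = n // 2
--
--         for i in range(1, k + 1):
--             r = rows_with_2[-i]
--             out[r][col] = 8
--
--     return out
-- ===== SOURCE B (Python) =====
-- def transform(grid):
--     if not grid:
--         return []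
--     width = len(grid[0])
--     counts = [sum(1 for row in grid if row[c] == 2) for c in range(width)]
--     thresh = [n - n // 2 for n in counts]
--     seen = [0] * width
--     out = []
--     for row in grid:
--         new = row[:]
--         for c in range(width):
--             if row[c] == 2:
--                 seen[c] += 1
--                 if seen[c] > thresh[c]:
--                     new[c] = 8
--         out.append(new)
--     return out
-- ===== Notes on version B (the rewrite author's own statement) =====
-- stated objective: alternative
-- what changed: Replaces A's per-column pass that materialises the list of row indices holding 2 and rewrites the last n//2 of them via negative indexing by a precomputed per-column count table plus one top-to-bottom pass with a running per-column counter that recolors a 2 once the counter exceeds n - n//2.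
import Mathlib
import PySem

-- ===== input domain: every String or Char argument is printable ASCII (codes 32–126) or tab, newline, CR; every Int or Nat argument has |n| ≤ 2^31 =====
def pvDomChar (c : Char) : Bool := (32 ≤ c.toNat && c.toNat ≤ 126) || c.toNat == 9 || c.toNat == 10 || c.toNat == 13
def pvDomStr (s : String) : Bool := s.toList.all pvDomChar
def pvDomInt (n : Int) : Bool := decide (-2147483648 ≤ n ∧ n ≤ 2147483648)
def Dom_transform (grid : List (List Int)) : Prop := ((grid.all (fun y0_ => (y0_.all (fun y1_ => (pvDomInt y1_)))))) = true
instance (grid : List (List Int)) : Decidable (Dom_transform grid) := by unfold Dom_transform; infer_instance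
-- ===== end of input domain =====

-- B replaces A's per-column index-list pass (collect the row indices of 2s, recolor the
-- last n//2 of them via negative indexing) by one count table plus a single top-to-bottom
-- pass with a running per-column counter; a different decomposition of the same task.

-- ===== PORT A =====
-- out[r][col] = 8  (indices are in range under Pre_; the getD defaults are never reached there)
def pvSetCell (out : List (List Int)) (r c : Nat) : List (List Int) :=
  out.set r ((out.getD r []).set c 8)

def pvProcCol (height : Nat) (out : List (List Int)) (col : Nat) : List (List Int) :=
  let rows2 := (List.range height).filter (fun r => (out.getD r []).getD col 0 == 2)
  let n := rows2.length
  let k := n / 2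
  (PySem.List.pyRange 1 ((k : Int) + 1) 1).foldl
    (fun out i => pvSetCell out ((PySem.List.pyGet? rows2 (-i)).getD 0) col) out

def transform (grid : List (List Int)) : List (List Int) :=
  let out := grid.map (fun row => PySem.List.slice row none none)
  let height := out.length
  if height = 0 then out
  else
    let width := (out.headD []).length
    (List.range width).foldl (pvProcCol height) out

-- ===== PORT B =====
def pvCellStep (thresh : List Nat) (row : List Int) (q : List Nat × List Int) (c : Nat) :
    List Nat × List Int :=
  if row.getD c 0 == 2 then
    let seen := q.1.set c (q.1.getD c 0 + 1)
    if thresh.getD c 0 < seen.getD c 0 then (seen, q.2.set c 8) else (seen, q.2)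
  else q

def pvRowStep (width : Nat) (thresh : List Nat) (st : List Nat × List (List Int))
    (row : List Int) : List Nat × List (List Int) :=
  let p := (List.range width).foldl (pvCellStep thresh row) (st.1, PySem.List.slice row none none)
  (p.1, st.2 ++ [p.2])

def transform_alt (grid : List (List Int)) : List (List Int) :=
  if grid = [] then []
  else
    let width := (grid.headD []).length
    let counts := (List.range width).map (fun c => grid.countP (fun row => row.getD c 0 == 2))
    let thresh := counts.map (fun n => n - n / 2)
    (grid.foldl (pvRowStep width thresh) (List.replicate width 0, [])).2

-- ===== PRECONDITION & SPEC =====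
-- Pre_ excludes exactly the ragged grids in which some row is shorter than the first
-- row: there Python A (and B alike) raises IndexError on out[row][col].
def Pre_transform (grid : List (List Int)) : Prop :=
  ∀ row ∈ grid, (grid.headD []).length ≤ row.length
instance (grid : List (List Int)) : Decidable (Pre_transform grid) := by
  unfold Pre_transform; infer_instance

def pvWitness_transform : List (List Int) := [[2, 0], [2, 2], [0, 2], [2, 0]]

def Spec_transform (grid : List (List Int)) (out : List (List Int)) : Prop :=
  out = transform_alt grid
instance (grid : List (List Int)) (out : List (List Int)) : Decidable (Spec_transform grid out) := by
  unfold Spec_transform; infer_instance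

-- ===== CLAIM (what is proved, stated in full; the proofs are below) =====
def Claim_equal_transform : Prop :=
  ∀ (grid : List (List Int)), Dom_transform grid → Pre_transform grid →
    Spec_transform grid (transform grid)

-- ===== LEMMAS AND PROOFS =====
def pvVal (g : List (List Int)) (r c : Nat) : Int := (g.getD r []).getD c 0
def pvRows2 (g : List (List Int)) (c : Nat) : List Nat :=
  (List.range g.length).filter (fun r => (g.getD r []).getD c 0 == 2)
def pvN (g : List (List Int)) (c : Nat) : Nat := (pvRows2 g c).length
def pvCW (g : List (List Int)) (c m : Nat) : Nat :=
  ((List.range m).filter (fun r => (g.getD r []).getD c 0 == 2)).length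

theorem pv_cw_succ (g : List (List Int)) (c t : Nat) :
    pvCW g c (t + 1) = pvCW g c t + (if (g.getD t []).getD c 0 == 2 then 1 else 0) := by
  unfold pvCW
  rw [List.range_succ, List.filter_append, List.length_append, List.filter_singleton]
  cases h : ((g.getD t []).getD c 0 == 2) <;> simp

theorem pv_aux_filter_range (n r : Nat) (p : Nat → Bool) (h : r + 1 ≤ n) :
    ((List.range n).filter (fun x => decide (x ≤ r) && p x)).length =
      ((List.range (r + 1)).filter p).length := by
  induction n with
  | zero => omega
  | succ n ih =>
      rcases Nat.lt_or_ge r n with h2 | h2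
      · rw [List.range_succ, List.filter_append]
        have he : (List.filter (fun x => decide (x ≤ r) && p x) [n]) = [] := by
          simp; omega
        rw [he]
        simp [ih (by omega)]
      · have : r = n := by omega
        subst this
        rw [List.range_succ, List.filter_append]
        simp only [List.length_append]
        have h3 : ((List.range r).filter (fun x => decide (x ≤ r) && p x)).length =
            ((List.range r).filter p).length := by
          congr 1
          apply List.filter_congr
          intro x hx
          simp only [List.mem_range] at hx
          simp [Nat.le_of_lt hx]
        rw [h3]
        rcases hp : p r <;> simp [hp]

theorem pv_filter_le_range (g : List (List Int)) (c r : Nat) (hr : r < g.length) :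
    ((pvRows2 g c).filter (fun x => decide (x ≤ r))).length = pvCW g c (r + 1) := by
  rw [pvRows2, List.filter_filter, pvCW]
  exact pv_aux_filter_range g.length r _ (by omega)

theorem pv_row_set (out : List (List Int)) (r r' : Nat) (v : List Int) :
    (out.set r v).getD r' [] = if r' = r ∧ r < out.length then v else out.getD r' [] := by
  by_cases e : r' = r
  · subst e
    rcases Nat.lt_or_ge r' out.length with h | h
    · simp [List.getD_eq_getElem?_getD, List.getElem?_set_self h, h]
    · rw [List.set_eq_of_length_le h]
      rw [if_neg (by omega)]
  · simp [List.getD_eq_getElem?_getD, List.getElem?_set_ne (fun hh => e hh.symm), e]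

theorem pv_elem_set (row : List Int) (c c' : Nat) (v : Int) :
    (row.set c v).getD c' 0 = if c' = c ∧ c < row.length then v else row.getD c' 0 := by
  by_cases e : c' = c
  · subst e
    rcases Nat.lt_or_ge c' row.length with h | h
    · simp [List.getD_eq_getElem?_getD, List.getElem?_set_self h, h]
    · rw [List.set_eq_of_length_le h]
      rw [if_neg (by omega)]
  · simp [List.getD_eq_getElem?_getD, List.getElem?_set_ne (fun hh => e hh.symm), e]

theorem pv_setCell_len (out : List (List Int)) (r c : Nat) :
    (pvSetCell out r c).length = out.length := by
  simp [pvSetCell]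

theorem pv_setCell_rowlen (out : List (List Int)) (r c r' : Nat) :
    ((pvSetCell out r c).getD r' []).length = (out.getD r' []).length := by
  unfold pvSetCell
  rw [pv_row_set]
  by_cases h1 : r' = r ∧ r < out.length
  · rw [if_pos h1, List.length_set]
    rw [h1.1]
  · rw [if_neg h1]

theorem pv_val_setCell (out : List (List Int)) (r c r' c' : Nat) :
    pvVal (pvSetCell out r c) r' c' =
      if r' = r ∧ c' = c ∧ r < out.length ∧ c < (out.getD r []).length then 8
      else pvVal out r' c' := by
  unfold pvSetCell pvVal
  rw [pv_row_set]
  by_cases h1 : r' = r ∧ r < out.length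
  · rw [if_pos h1]
    obtain ⟨e, hr⟩ := h1
    subst e
    rw [pv_elem_set]
    by_cases h2 : c' = c ∧ c < (out.getD r' []).length
    · rw [if_pos h2, if_pos ⟨rfl, h2.1, hr, h2.2⟩]
    · rw [if_neg h2, if_neg (by tauto)]
  · rw [if_neg h1, if_neg (by tauto)]

theorem pv_rows2_sorted (g : List (List Int)) (c : Nat) : (pvRows2 g c).Pairwise (· < ·) :=
  (List.pairwise_lt_range).filter _

theorem pv_mem_drop_sorted (l : List Nat) (hs : l.Pairwise (· < ·)) (d r : Nat) :
    r ∈ l.drop d ↔ r ∈ l ∧ d < (l.filter (fun x => decide (x ≤ r))).length := by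
  induction l generalizing d with
  | nil => simp
  | cons x xs ih =>
      have hx : ∀ y ∈ xs, x < y := by
        intro y hy; exact (List.pairwise_cons.mp hs).1 y hy
      have hs' := (List.pairwise_cons.mp hs).2
      cases d with
      | zero =>
          simp only [List.drop_zero]
          constructor
          · intro h; refine ⟨h, ?_⟩
            have hmem : r ∈ (x :: xs).filter (fun x => decide (x ≤ r)) :=
              List.mem_filter.mpr ⟨h, by simp⟩
            have := List.length_pos_of_mem hmem
            omega
          · exact fun h => h.1
      | succ d =>
          simp only [List.drop_succ_cons]
          rw [ih hs' d]
          by_cases hxr : x ≤ r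
          · by_cases hrx : r = x
            · subst hrx
              have h1 : r ∉ xs := fun h => absurd (hx r h) (lt_irrefl r)
              have h2 : xs.filter (fun x => decide (x ≤ r)) = [] := by
                apply List.filter_eq_nil_iff.mpr
                intro y hy
                simp only [decide_eq_true_eq]
                intro hyr
                exact absurd (hx y hy) (by omega)
              simp [h1, List.filter_cons, hxr, h2]
            · simp only [List.filter_cons, hxr, decide_true, if_true, List.length_cons,
                List.mem_cons]
              constructor
              · rintro ⟨h1, h2⟩; exact ⟨Or.inr h1, by omega⟩
              · rintro ⟨h1, h2⟩
                rcases h1 with h1 | h1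
                · exact absurd h1 hrx
                · exact ⟨h1, by omega⟩
          · have h1 : r ∉ xs := by
              intro h; exact hxr (by have := hx r h; omega)
            have h0 : r ≠ x := by intro h; exact hxr (le_of_eq h.symm)
            simp [h1, h0]

theorem pv_meet (g : List (List Int)) (c r : Nat) (hr : r < g.length) :
    (r ∈ (pvRows2 g c).drop (pvN g c - pvN g c / 2)) ↔
      ((g.getD r []).getD c 0 == 2) = true ∧ pvN g c - pvN g c / 2 < pvCW g c (r + 1) := by
  rw [pv_mem_drop_sorted _ (pv_rows2_sorted g c), pv_filter_le_range g c r hr]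
  have hm : r ∈ pvRows2 g c ↔ ((g.getD r []).getD c 0 == 2) = true := by
    simp [pvRows2, List.mem_filter, List.mem_range, hr]
  rw [hm]

def pvInnerA (c : Nat) (rows2 : List Nat) (m : Nat) (out : List (List Int)) :
    List (List Int) :=
  (PySem.List.pyRange 1 ((m : Int) + 1) 1).foldl
    (fun o i => pvSetCell o ((PySem.List.pyGet? rows2 (-i)).getD 0) c) out

theorem pv_foldA (c : Nat) (rows2 : List Nat) (m : Nat) (hm : m ≤ rows2.length)
    (out : List (List Int))
    (hin : ∀ r ∈ rows2, r < out.length ∧ c < (out.getD r []).length) :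
    (pvInnerA c rows2 m out).length = out.length ∧
      (∀ r', (((pvInnerA c rows2 m out).getD r' []).length = (out.getD r' []).length)) ∧
      (∀ r' c', pvVal (pvInnerA c rows2 m out) r' c' =
        if c' = c ∧ r' ∈ rows2.drop (rows2.length - m) then 8 else pvVal out r' c') := by
  induction m with
  | zero =>
      rw [show pvInnerA c rows2 0 out = out from by
        unfold pvInnerA
        rw [show ((0 : Nat) : Int) + 1 = 1 from by norm_num,
          PySem.List.pyRange_one_eq_nil (le_refl 1)]
        rfl]
      refine ⟨rfl, fun _ => rfl, fun r' c' => ?_⟩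
      rw [Nat.sub_zero, List.drop_length]
      simp
  | succ m ih =>
      have hm' : m ≤ rows2.length := by omega
      obtain ⟨ihlen, ihrow, ihval⟩ := ih hm'
      have hidx : rows2.length - (m + 1) < rows2.length := by omega
      have hstep : pvInnerA c rows2 (m + 1) out =
          pvSetCell (pvInnerA c rows2 m out)
            ((PySem.List.pyGet? rows2 (-((m : Int) + 1))).getD 0) c := by
        unfold pvInnerA
        have hc : (((m + 1 : Nat) : Int) + 1) = (((m : Int) + 1) + 1) := by push_cast; ring
        rw [hc, PySem.List.pyRange_one_succ_right (show (1:Int) ≤ (m : Int) + 1 by omega),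
          List.foldl_append]
        rfl
      have hget : PySem.List.pyGet? rows2 (-((m : Int) + 1)) =
          some (rows2[rows2.length - (m + 1)]) := by
        have h1 : (-((m : Int) + 1)) = -(((m + 1 : Nat) : Int)) := by push_cast; ring
        rw [h1, PySem.List.pyGet?_neg_natCast rows2 (m + 1) (by omega) (by omega)]
        exact List.getElem?_eq_getElem hidx
      set rstar := rows2[rows2.length - (m + 1)] with hrstar
      have hrmem : rstar ∈ rows2 := List.getElem_mem hidx
      have hsub : rows2.length - (m + 1) + 1 = rows2.length - m := by omega
      have hdrop : rows2.drop (rows2.length - (m + 1)) =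
          rstar :: rows2.drop (rows2.length - m) := by
        rw [List.drop_eq_getElem_cons hidx, hsub]
      refine ⟨?_, ?_, ?_⟩
      · rw [hstep, pv_setCell_len, ihlen]
      · intro r'
        rw [hstep, pv_setCell_rowlen, ihrow]
      · intro r' c'
        rw [hstep, hget]
        simp only [Option.getD_some]
        rw [pv_val_setCell]
        have hcond : rstar < (pvInnerA c rows2 m out).length ∧
            c < ((pvInnerA c rows2 m out).getD rstar []).length := by
          rw [ihlen, ihrow]
          exact hin rstar hrmem
        by_cases h1 : r' = rstar ∧ c' = c
        · rw [if_pos ⟨h1.1, h1.2, hcond.1, hcond.2⟩, hdrop]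
          rw [if_pos ⟨h1.2, by rw [h1.1]; exact List.mem_cons_self⟩]
        · have : ¬ (r' = rstar ∧ c' = c ∧ (pvInnerA c rows2 m out).length > 0 ∧ True) := by tauto
          rw [if_neg (by tauto), ihval, hdrop]
          by_cases h2 : c' = c ∧ r' ∈ rows2.drop (rows2.length - m)
          · rw [if_pos h2, if_pos ⟨h2.1, List.mem_cons_of_mem _ h2.2⟩]
          · rw [if_neg h2, if_neg (by
              rintro ⟨hc', hmem⟩
              rcases List.mem_cons.mp hmem with h | h
              · exact h1 ⟨h, hc'⟩
              · exact h2 ⟨hc', h⟩)]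


theorem pv_mem_rows2 (g : List (List Int)) (c r : Nat) :
    r ∈ pvRows2 g c ↔ r < g.length ∧ ((g.getD r []).getD c 0 == 2) = true := by
  simp [pvRows2, List.mem_filter, List.mem_range]

theorem pv_procCol (out : List (List Int)) (col : Nat)
    (hcol : ∀ r, r < out.length → col < (out.getD r []).length) :
    (pvProcCol out.length out col).length = out.length ∧
      (∀ r', (((pvProcCol out.length out col).getD r' []).length = (out.getD r' []).length)) ∧
      (∀ r' c', pvVal (pvProcCol out.length out col) r' c' =
        if c' = col ∧ r' ∈ (pvRows2 out col).drop (pvN out col - pvN out col / 2) then 8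
        else pvVal out r' c') := by
  have heq : pvProcCol out.length out col = pvInnerA col (pvRows2 out col) (pvN out col / 2) out := rfl
  have hin : ∀ r ∈ pvRows2 out col, r < out.length ∧ col < (out.getD r []).length := by
    intro r hr
    have := (pv_mem_rows2 out col r).mp hr
    exact ⟨this.1, hcol r this.1⟩
  have h := pv_foldA col (pvRows2 out col) (pvN out col / 2) (Nat.div_le_self _ _) out hin
  rw [heq]
  exact h

def pvF (g : List (List Int)) (r c : Nat) : Int :=
  if r ∈ (pvRows2 g c).drop (pvN g c - pvN g c / 2) then 8 else pvVal g r c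

theorem pv_foldA_outer (g : List (List Int)) (w : Nat)
    (hw : ∀ r, r < g.length → w ≤ (g.getD r []).length) :
    ∀ (cols doneL : List Nat) (out : List (List Int)),
      cols.Nodup →
      (∀ c ∈ cols, c < w ∧ c ∉ doneL) →
      out.length = g.length →
      (∀ r', (out.getD r' []).length = (g.getD r' []).length) →
      (∀ r' c', pvVal out r' c' = if c' ∈ doneL then pvF g r' c' else pvVal g r' c') →
      ((cols.foldl (pvProcCol g.length) out).length = g.length ∧
        (∀ r', ((cols.foldl (pvProcCol g.length) out).getD r' []).length = (g.getD r' []).length) ∧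
        (∀ r' c', pvVal (cols.foldl (pvProcCol g.length) out) r' c' =
          if c' ∈ doneL ++ cols then pvF g r' c' else pvVal g r' c')) := by
  intro cols
  induction cols with
  | nil =>
      intro doneL out _ _ h1 h2 h3
      simpa using ⟨h1, h2, h3⟩
  | cons col cols ih =>
      intro doneL out hnd hfresh hlen hrow hval
      have hndc := List.nodup_cons.mp hnd
      have hcolw : col < w ∧ col ∉ doneL := hfresh col List.mem_cons_self
      have hcol2 : ∀ r, r < out.length → col < (out.getD r []).length := by
        intro r hr
        rw [hrow]
        have := hw r (by omega)
        omega
      have hrows2 : pvRows2 out col = pvRows2 g col := by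
        unfold pvRows2
        rw [hlen]
        apply List.filter_congr
        intro r hr
        have h := hval r col
        rw [if_neg (fun hh => hcolw.2 hh)] at h
        rw [show (out.getD r []).getD col 0 = pvVal out r col from rfl, h]
        rfl
      have hN : pvN out col = pvN g col := by unfold pvN; rw [hrows2]
      obtain ⟨slen, srow, sval⟩ := pv_procCol out col hcol2
      rw [hlen] at slen srow sval
      set out' := pvProcCol g.length out col with hout'
      have hval' : ∀ r' c', pvVal out' r' c' =
          if c' ∈ doneL ++ [col] then pvF g r' c' else pvVal g r' c' := by
        intro r' c'
        rw [sval, hrows2, hN]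
        by_cases hc : c' = col
        · subst hc
          have hvg2 : pvVal out r' c' = pvVal g r' c' := by
            rw [hval, if_neg (fun hh => hcolw.2 hh)]
          by_cases hmem : r' ∈ (pvRows2 g c').drop (pvN g c' - pvN g c' / 2)
          · rw [if_pos ⟨rfl, hmem⟩, if_pos (by simp)]
            unfold pvF
            rw [if_pos hmem]
          · rw [if_neg (by tauto), if_pos (by simp), hvg2]
            unfold pvF
            rw [if_neg hmem]
        · rw [if_neg (by tauto), hval]
          by_cases hd : c' ∈ doneL
          · rw [if_pos hd, if_pos (by simp [hd])]
          · rw [if_neg hd, if_neg (by simp [hd, hc])]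
      have hres := ih (doneL ++ [col]) out' hndc.2
        (by
          intro c hc
          have := hfresh c (List.mem_cons_of_mem _ hc)
          refine ⟨this.1, ?_⟩
          simp only [List.mem_append, List.mem_singleton]
          rintro (h | h)
          · exact this.2 h
          · exact hndc.1 (h ▸ hc))
        slen (by intro r'; rw [srow, hrow]) hval'
      have happ : (doneL ++ [col]) ++ cols = doneL ++ (col :: cols) := by simp
      rw [happ] at hres
      simpa using hres

theorem pv_getD_set {α : Type} (l : List α) (i j : Nat) (v d : α) :
    (l.set i v).getD j d = if j = i ∧ i < l.length then v else l.getD j d := by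
  by_cases e : j = i
  · subst e
    rcases Nat.lt_or_ge j l.length with h | h
    · simp [List.getD_eq_getElem?_getD, List.getElem?_set_self h, h]
    · rw [List.set_eq_of_length_le h]
      rw [if_neg (by omega)]
  · simp [List.getD_eq_getElem?_getD, List.getElem?_set_ne (fun hh => e hh.symm), e]


theorem pv_cellFold (th : List Nat) (row : List Int) (seen : List Nat) (new : List Int) :
    ∀ m, m ≤ seen.length → m ≤ new.length →
      ((List.range m).foldl (pvCellStep th row) (seen, new)).1.length = seen.length ∧
      ((List.range m).foldl (pvCellStep th row) (seen, new)).2.length = new.length ∧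
      (∀ c, ((List.range m).foldl (pvCellStep th row) (seen, new)).1.getD c 0 =
        if c < m ∧ (row.getD c 0 == 2) = true then seen.getD c 0 + 1 else seen.getD c 0) ∧
      (∀ c, ((List.range m).foldl (pvCellStep th row) (seen, new)).2.getD c 0 =
        if c < m ∧ (row.getD c 0 == 2) = true ∧ th.getD c 0 < seen.getD c 0 + 1 then 8
        else new.getD c 0) := by
  intro m
  induction m with
  | zero =>
      intro _ _
      refine ⟨rfl, rfl, ?_, ?_⟩ <;> (intro c; simp)
  | succ m ih =>
      intro hm1 hm2
      obtain ⟨l1, l2, hseen, hnew⟩ := ih (by omega) (by omega)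
      rw [List.range_succ, List.foldl_append]
      set q := (List.range m).foldl (pvCellStep th row) (seen, new) with hq
      have hstep : List.foldl (pvCellStep th row) q [m] = pvCellStep th row q m := rfl
      rw [hstep]
      have hq1m : q.1.getD m 0 = seen.getD m 0 := by
        rw [hseen]; rw [if_neg (by omega)]
      by_cases hrow : (row.getD m 0 == 2) = true
      · have hsetm : (q.1.set m (q.1.getD m 0 + 1)).getD m 0 = seen.getD m 0 + 1 := by
          rw [pv_getD_set, if_pos ⟨rfl, by omega⟩, hq1m]
        have hseen' : ∀ c, (q.1.set m (q.1.getD m 0 + 1)).getD c 0 =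
            if c < m + 1 ∧ (row.getD c 0 == 2) = true then seen.getD c 0 + 1
            else seen.getD c 0 := by
          intro c
          by_cases e : c = m
          · subst e
            rw [hsetm, if_pos ⟨by omega, hrow⟩]
          · rw [pv_getD_set, if_neg (by tauto), hseen]
            by_cases h1 : c < m ∧ (row.getD c 0 == 2) = true
            · rw [if_pos h1, if_pos ⟨by omega, h1.2⟩]
            · rw [if_neg h1, if_neg (by
                rintro ⟨hh1, hh2⟩
                exact h1 ⟨by omega, hh2⟩)]
        have hslen : (q.1.set m (q.1.getD m 0 + 1)).length = seen.length := by
          rw [List.length_set, l1]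
        simp only [pvCellStep]
        rw [if_pos hrow]
        by_cases hth : th.getD m 0 < (q.1.set m (q.1.getD m 0 + 1)).getD m 0
        · rw [if_pos hth]
          refine ⟨hslen, by rw [List.length_set, l2], hseen', ?_⟩
          intro c
          by_cases e : c = m
          · subst e
            rw [pv_getD_set, if_pos ⟨rfl, by omega⟩,
              if_pos ⟨by omega, hrow, by rw [hsetm] at hth; omega⟩]
          · rw [pv_getD_set, if_neg (by tauto), hnew]
            by_cases h1 : c < m ∧ (row.getD c 0 == 2) = true ∧ th.getD c 0 < seen.getD c 0 + 1
            · rw [if_pos h1, if_pos ⟨by omega, h1.2⟩]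
            · rw [if_neg h1, if_neg (by
                rintro ⟨hh1, hh2⟩
                exact h1 ⟨by omega, hh2⟩)]
        · rw [if_neg hth]
          refine ⟨hslen, l2, hseen', ?_⟩
          intro c
          by_cases e : c = m
          · subst e
            rw [hnew, if_neg (by omega), if_neg (by
              rintro ⟨_, _, hh⟩
              rw [hsetm] at hth
              omega)]
          · rw [hnew]
            by_cases h1 : c < m ∧ (row.getD c 0 == 2) = true ∧ th.getD c 0 < seen.getD c 0 + 1
            · rw [if_pos h1, if_pos ⟨by omega, h1.2⟩]
            · rw [if_neg h1, if_neg (by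
                rintro ⟨hh1, hh2⟩
                exact h1 ⟨by omega, hh2⟩)]
      · simp only [pvCellStep]
        rw [if_neg hrow]
        refine ⟨l1, l2, ?_, ?_⟩
        · intro c
          rw [hseen]
          by_cases e : c = m
          · subst e
            rw [if_neg (by omega), if_neg (by tauto)]
          · by_cases h1 : c < m ∧ (row.getD c 0 == 2) = true
            · rw [if_pos h1, if_pos ⟨by omega, h1.2⟩]
            · rw [if_neg h1, if_neg (by
                rintro ⟨hh1, hh2⟩
                exact h1 ⟨by omega, hh2⟩)]
        · intro c
          rw [hnew]
          by_cases e : c = m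
          · subst e
            rw [if_neg (by omega), if_neg (by tauto)]
          · by_cases h1 : c < m ∧ (row.getD c 0 == 2) = true ∧ th.getD c 0 < seen.getD c 0 + 1
            · rw [if_pos h1, if_pos ⟨by omega, h1.2⟩]
            · rw [if_neg h1, if_neg (by
                rintro ⟨hh1, hh2⟩
                exact h1 ⟨by omega, hh2⟩)]


def pvRowE (g : List (List Int)) (w : Nat) (th : List Nat) (t : Nat) : List Int :=
  (g.getD t []).mapIdx (fun c v =>
    if c < w ∧ (v == 2) = true ∧ th.getD c 0 < pvCW g c (t + 1) then 8 else v)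

theorem pv_rowFold (g : List (List Int)) (w : Nat) (th : List Nat)
    (hw : ∀ r, r < g.length → w ≤ (g.getD r []).length) :
    ∀ (rest : List (List Int)) (t : Nat) (seen : List Nat) (acc : List (List Int)),
      g.drop t = rest →
      seen.length = w → (∀ c, c < w → seen.getD c 0 = pvCW g c t) →
      (rest.foldl (pvRowStep w th) (seen, acc)).2 =
        acc ++ (List.range rest.length).map (fun j => pvRowE g w th (t + j)) := by
  intro rest
  induction rest with
  | nil => intro t seen acc _ _ _; simp
  | cons row rest' ih =>
      intro t seen acc hdrop hslen hsval
      have ht : t < g.length := by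
        by_contra h
        rw [List.drop_eq_nil_of_le (by omega)] at hdrop
        simp at hdrop
      have hcons := List.drop_eq_getElem_cons ht
      rw [hdrop] at hcons
      have hrow : row = g[t] := by
        injection hcons with h1 _
      have hrest : g.drop (t + 1) = rest' := by
        injection hcons with _ h2
        exact h2.symm
      have hgetd : g.getD t [] = row := by
        rw [List.getD_eq_getElem?_getD, List.getElem?_eq_getElem ht, hrow]
        rfl
      have hwlen : w ≤ row.length := by
        have := hw t ht
        rw [hgetd] at this
        exact this
      obtain ⟨p1len, p2len, p1val, p2val⟩ :=
        pv_cellFold th row seen row w (by omega) hwlen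
      -- the fold body uses slice row none none = row
      have hstep : pvRowStep w th (seen, acc) row =
          (((List.range w).foldl (pvCellStep th row) (seen, row)).1,
            acc ++ [((List.range w).foldl (pvCellStep th row) (seen, row)).2]) := by
        simp only [pvRowStep, PySem.List.slice_none_none]
      -- new seen satisfies the invariant at t+1
      have hseen' : ∀ c, c < w →
          ((List.range w).foldl (pvCellStep th row) (seen, row)).1.getD c 0 = pvCW g c (t + 1) := by
        intro c hc
        rw [p1val, pv_cw_succ, hgetd]
        by_cases h2 : (row.getD c 0 == 2) = true
        · rw [if_pos ⟨hc, h2⟩, hsval c hc, if_pos h2]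
        · rw [if_neg (by tauto), hsval c hc, if_neg h2]
          omega
      -- the produced row is pvRowE
      have hgd : ∀ (i : Nat) (hi : i < row.length), row.getD i 0 = row[i]'hi := by
        intro i hi
        rw [List.getD_eq_getElem?_getD, List.getElem?_eq_getElem hi]
        rfl
      have hrowE : ((List.range w).foldl (pvCellStep th row) (seen, row)).2 = pvRowE g w th t := by
        apply List.ext_getElem?
        intro i
        unfold pvRowE
        rw [hgetd, List.getElem?_mapIdx]
        rcases Nat.lt_or_ge i row.length with hi | hi
        · rw [List.getElem?_eq_getElem (by rw [p2len]; exact hi), List.getElem?_eq_getElem hi]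
          simp only [Option.map_some]
          have hval : ((List.range w).foldl (pvCellStep th row) (seen, row)).2[i]'(by rw [p2len]; exact hi) =
              ((List.range w).foldl (pvCellStep th row) (seen, row)).2.getD i 0 := by
            rw [List.getD_eq_getElem?_getD, List.getElem?_eq_getElem (by rw [p2len]; exact hi)]
            rfl
          rw [hval, p2val]
          congr 1
          rw [← hgd i hi]
          by_cases hc : i < w
          · have hcw : pvCW g i (t + 1) = pvCW g i t + (if (row.getD i 0 == 2) then 1 else 0) := by
              rw [pv_cw_succ, hgetd]
            by_cases h2 : (row.getD i 0 == 2) = true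
            · rw [if_pos h2] at hcw
              by_cases h3 : th.getD i 0 < seen.getD i 0 + 1
              · rw [if_pos ⟨hc, h2, h3⟩, if_pos ⟨hc, h2, by
                  rw [hcw, ← hsval i hc]; omega⟩]
              · rw [if_neg (by tauto), if_neg (by
                  rintro ⟨_, _, hh⟩
                  rw [hcw, ← hsval i hc] at hh
                  omega)]
            · rw [if_neg (by tauto), if_neg (by tauto)]
          · rw [if_neg (by tauto), if_neg (by tauto)]
        · rw [List.getElem?_eq_none (by rw [p2len]; omega), List.getElem?_eq_none hi]
          rfl
      rw [List.foldl_cons, hstep, ih (t + 1)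
        (((List.range w).foldl (pvCellStep th row) (seen, row)).1)
        (acc ++ [((List.range w).foldl (pvCellStep th row) (seen, row)).2])
        hrest (by rw [p1len, hslen]) hseen', hrowE]
      have hfin : pvRowE g w th t :: List.map (fun j => pvRowE g w th (t + 1 + j))
          (List.range rest'.length) =
          List.map (fun j => pvRowE g w th (t + j)) (List.range (rest'.length + 1)) := by
        rw [List.range_succ_eq_map, List.map_cons, List.map_map]
        congr 1
        apply List.map_congr_left
        intro j _
        show pvRowE g w th (t + 1 + j) = pvRowE g w th (t + (j + 1))
        congr 1
        omega
      rw [List.length_cons, List.append_assoc, List.singleton_append, hfin]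



theorem pv_countP_eq_range {α : Type} (g : List α) (p : α → Bool) (d : α) :
    g.countP p = ((List.range g.length).filter (fun r => p (g.getD r d))).length := by
  induction g using List.reverseRecOn with
  | nil => simp
  | append_singleton g x ih =>
      simp only [List.length_append, List.length_singleton, List.range_succ, List.filter_append,
        List.length_append, List.countP_append]
      rw [ih]
      congr 1
      · apply congrArg
        apply List.filter_congr
        intro r hr
        simp only [List.mem_range] at hr
        rw [List.getD_append _ _ _ _ hr]
      · simp [List.countP_singleton, List.filter]
        rcases h : p x <;> simp [h, List.getD]

theorem pv_th (g : List (List Int)) (w c : Nat) (hc : c < w) :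
    ((((List.range w).map (fun c => g.countP (fun row => row.getD c 0 == 2))).map
      (fun n => n - n / 2)).getD c 0) = pvN g c - pvN g c / 2 := by
  rw [List.getD_eq_getElem?_getD, List.getElem?_map, List.getElem?_map, List.getElem?_range hc]
  simp only [Option.map_some, Option.getD_some]
  have h : g.countP (fun row => row.getD c 0 == 2) = pvN g c := by
    rw [pv_countP_eq_range g _ []]
    rfl
  rw [h]

theorem pv_getElem_eq_getD {α : Type} (l : List α) (i : Nat) (d : α) (h : i < l.length) :
    l[i]'h = l.getD i d := by
  rw [List.getD_eq_getElem?_getD, List.getElem?_eq_getElem h]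
  rfl

theorem pv_main (g : List (List Int)) (hPre : ∀ row ∈ g, (g.headD []).length ≤ row.length) :
    transform g = transform_alt g := by
  by_cases hg : g = []
  · subst hg; rfl
  · have hw : ∀ r, r < g.length → (g.headD []).length ≤ (g.getD r []).length := by
      intro r hr
      apply hPre
      rw [List.getD_eq_getElem?_getD, List.getElem?_eq_getElem hr]
      exact List.getElem_mem hr
    set w := (g.headD []).length with hwdef
    set TH := ((List.range w).map (fun c => g.countP (fun row => row.getD c 0 == 2))).map
      (fun n => n - n / 2) with hTH
    obtain ⟨alen, arow, aval⟩ := pv_foldA_outer g w hw (List.range w) [] g List.nodup_range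
      (fun c hc => ⟨List.mem_range.mp hc, by simp⟩) rfl (fun r' => rfl)
      (by intro r' c'; rw [if_neg (by simp)])
    have hA : transform g = (List.range w).foldl (pvProcCol g.length) g := by
      simp only [transform, PySem.List.slice_none_none, List.map_id']
      rw [← hwdef]
      rw [if_neg (fun h => hg (List.eq_nil_of_length_eq_zero h))]
    have hB : transform_alt g = (List.range g.length).map (fun j => pvRowE g w TH j) := by
      simp only [transform_alt]
      rw [if_neg hg, ← hwdef, ← hTH]
      rw [pv_rowFold g w TH hw g 0 (List.replicate w 0) [] List.drop_zero
        List.length_replicate (fun c hc => by rw [List.getD_replicate _ hc]; rfl)]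
      rw [List.nil_append]
      apply List.map_congr_left
      intro j _
      congr 1
      omega
    rw [hA, hB]
    set res := (List.range w).foldl (pvProcCol g.length) g with hres
    apply List.ext_getElem?
    intro r
    rcases Nat.lt_or_ge r g.length with hr | hr
    · rw [List.getElem?_eq_getElem (show r < res.length by rw [alen]; exact hr),
        List.getElem?_eq_getElem (show r < ((List.range g.length).map
          (fun j => pvRowE g w TH j)).length by
            rw [List.length_map, List.length_range]; exact hr)]
      congr 1
      simp only [List.getElem_map, List.getElem_range]
      have hrowD : res[r]'(by rw [alen]; exact hr) = res.getD r [] :=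
        pv_getElem_eq_getD res r [] (by rw [alen]; exact hr)
      rw [hrowD]
      apply List.ext_getElem?
      intro c
      unfold pvRowE
      rw [List.getElem?_mapIdx]
      rcases Nat.lt_or_ge c ((g.getD r []).length) with hcr | hcr
      · rw [List.getElem?_eq_getElem (show c < (res.getD r []).length by
            rw [arow]; exact hcr),
          List.getElem?_eq_getElem hcr]
        simp only [Option.map_some]
        congr 1
        have hvd : (res.getD r [])[c]'(by rw [arow]; exact hcr) = pvVal res r c :=
          pv_getElem_eq_getD (res.getD r []) c 0 (by rw [arow]; exact hcr)
        have hv : (g.getD r [])[c]'hcr = (g.getD r []).getD c 0 :=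
          pv_getElem_eq_getD (g.getD r []) c 0 hcr
        rw [hvd, aval]
        by_cases hc : c < w
        · rw [if_pos (by simp [hc])]
          unfold pvF
          by_cases hm : r ∈ (pvRows2 g c).drop (pvN g c - pvN g c / 2)
          · obtain ⟨h2, h3⟩ := (pv_meet g c r hr).mp hm
            rw [if_pos hm, if_pos ⟨hc, by rw [hv]; exact h2, by
              rw [hTH, pv_th g w c hc]; exact h3⟩]
          · rw [if_neg hm, if_neg (by
              rintro ⟨_, hh2, hh3⟩
              apply hm
              apply (pv_meet g c r hr).mpr
              refine ⟨by rw [← hv]; exact hh2, ?_⟩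
              rw [hTH, pv_th g w c hc] at hh3
              exact hh3)]
            rw [hv]
            rfl
        · rw [if_neg (by simp [hc]), if_neg (by tauto), hv]
          rfl
      · rw [List.getElem?_eq_none (by rw [arow]; omega), List.getElem?_eq_none hcr]
        rfl
    · rw [List.getElem?_eq_none (by rw [alen]; omega),
        List.getElem?_eq_none (by rw [List.length_map, List.length_range]; omega)]

-- ===== VERDICT (by name: the statement is the Claim_ definition above) =====
theorem transform_spec : Claim_equal_transform := by
  intro grid _ hPre
  unfold Spec_transform
  exact pv_main grid hPre
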